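-- pv_equiv track=rewrite | github.com/openai/parameter-golf | HDC_Core_Model/Templates_Tools/grid_templates.py | scale_2x
-- ===== SOURCE A (Python) =====
-- from typing import List, Dict, Tuple, Optional, Any, Callable
--
-- Grid = List[List[int]]
--
-- def scale_2x(grid: Grid) -> Grid:
--     """Scale grid 2x (each cell becomes 2x2)."""
--     if not grid or not grid[0]:
--         return grid
--     height, width = len(grid), len(grid[0])
--     result = [[0] * (width * 2) for _ in range(height * 2)]
--
--     for y in range(height):
--         for x in range(width):
--             val = grid[y][x]
--             result[y * 2][x * 2] = val
--             result[y * 2][x * 2 + 1] = val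
--             result[y * 2 + 1][x * 2] = val
--             result[y * 2 + 1][x * 2 + 1] = val
--
--     return result
-- ===== SOURCE B (Python) =====
-- def scale_2x(grid):
--     """Scale grid 2x (each cell becomes 2x2)."""
--     if not grid or not grid[0]:
--         return grid
--     height, width = len(grid), len(grid[0])
--     return [[grid[i // 2][j // 2] for j in range(width * 2)]
--             for i in range(height * 2)]
-- ===== Notes on version B (the rewrite author's own statement) =====
-- stated objective: simpler
-- what changed: Gather instead of scatter: iterates over OUTPUT coordinates and reads each output cell directly as grid[i//2][j//2] in one comprehension, instead of preallocating a zero matrix and writing each input value into four indexed cells.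
import Mathlib
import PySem

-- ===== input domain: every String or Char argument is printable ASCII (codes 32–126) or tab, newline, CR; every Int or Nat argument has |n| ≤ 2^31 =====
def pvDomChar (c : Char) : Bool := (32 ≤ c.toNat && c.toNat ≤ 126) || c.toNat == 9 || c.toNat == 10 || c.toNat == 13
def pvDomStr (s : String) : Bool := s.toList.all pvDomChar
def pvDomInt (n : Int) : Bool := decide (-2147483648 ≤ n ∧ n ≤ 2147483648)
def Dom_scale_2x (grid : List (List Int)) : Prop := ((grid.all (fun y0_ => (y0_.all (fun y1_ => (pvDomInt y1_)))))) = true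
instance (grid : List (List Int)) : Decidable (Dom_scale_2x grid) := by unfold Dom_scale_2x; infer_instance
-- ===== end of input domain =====

-- B gathers: it iterates the OUTPUT coordinates and reads each output cell as grid[i//2][j//2],
-- instead of A's scatter into four indexed cells of a preallocated zero matrix; objective: simpler.

-- ===== PORT A =====
-- result[i][j] = v  on a list-of-lists (index i always in range in A's loop)
def setAt (m : List (List Int)) (i j : Nat) (v : Int) : List (List Int) :=
  m.set i ((m.getD i []).set j v)

-- the body of A's inner loop: the four corner writes for cell (y, x)
def innerStep (grid : List (List Int)) (y : Nat) (res : List (List Int)) (x : Nat) :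
    List (List Int) :=
  setAt (setAt (setAt (setAt res (2*y) (2*x) ((grid.getD y []).getD x 0))
      (2*y) (2*x+1) ((grid.getD y []).getD x 0))
      (2*y+1) (2*x) ((grid.getD y []).getD x 0))
    (2*y+1) (2*x+1) ((grid.getD y []).getD x 0)

def scale_2x (grid : List (List Int)) : List (List Int) :=
  if grid = [] ∨ grid.headD [] = [] then grid
  else
    (List.range grid.length).foldl
      (fun res y => (List.range (grid.headD []).length).foldl (innerStep grid y) res)
      ((List.range (2*grid.length)).map
        (fun _ => List.replicate (2*(grid.headD []).length) (0:Int)))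

-- ===== PORT B =====
-- [[grid[i // 2][j // 2] for j in range(width * 2)] for i in range(height * 2)]
def scale_2x_alt (grid : List (List Int)) : List (List Int) :=
  if grid = [] ∨ grid.headD [] = [] then grid
  else
    (List.range (2*grid.length)).map (fun i =>
      (List.range (2*(grid.headD []).length)).map (fun j =>
        (grid.getD (i/2) []).getD (j/2) 0))

-- ===== PRECONDITION & SPEC =====
-- Pre_ excludes ragged grids with a row shorter than the first row: there BOTH Pythons
-- raise IndexError (A at result-fill time, B when reading grid[i//2][j//2]).
def Pre_scale_2x (grid : List (List Int)) : Prop :=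
  ∀ row ∈ grid, (grid.headD []).length ≤ row.length
instance (grid : List (List Int)) : Decidable (Pre_scale_2x grid) := by
  unfold Pre_scale_2x; infer_instance

def pvWitness_scale_2x : List (List Int) := [[1, 2], [3, 4]]

def Spec_scale_2x (grid : List (List Int)) (out : List (List Int)) : Prop :=
  out = scale_2x_alt grid
instance (grid : List (List Int)) (out : List (List Int)) : Decidable (Spec_scale_2x grid out) := by
  unfold Spec_scale_2x; infer_instance

-- ===== CLAIM (what is proved, stated in full; the proofs are below) =====
def Claim_equal_scale_2x : Prop :=
  ∀ (grid : List (List Int)), Dom_scale_2x grid → Pre_scale_2x grid →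
    Spec_scale_2x grid (scale_2x grid)

-- ===== LEMMAS AND PROOFS =====

-- [v, v] for each of the first w values of row
def doubleRow (w : Nat) (row : List Int) : List Int :=
  (row.take w).flatMap (fun v => [v, v])

-- the partial state of A's pair of output rows after k steps of the inner loop
def partialRow (row : List Int) (w k : Nat) : List Int :=
  doubleRow k row ++ List.replicate (2*(w-k)) 0

theorem doubleRow_length (row : List Int) (k : Nat) (hk : k ≤ row.length) :
    (doubleRow k row).length = 2*k := by
  simp [doubleRow, List.length_flatMap, Function.comp]
  omega

theorem set_at_len {α : Type} (pre : List α) (a x : α) (tail : List α) :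
    (pre ++ a :: tail).set pre.length x = pre ++ x :: tail := by
  induction pre with
  | nil => simp
  | cons h t ih => simp [List.set, ih]

theorem setAt_pair0 (pre : List (List Int)) (a b : List Int) (post : List (List Int)) (j : Nat) (v : Int) :
    setAt (pre ++ a :: b :: post) pre.length j v = pre ++ a.set j v :: b :: post := by
  induction pre with
  | nil => simp [setAt]
  | cons h t ih => simpa [setAt, List.set, List.getD] using ih

theorem setAt_pair1 (pre : List (List Int)) (a b : List Int) (post : List (List Int)) (j : Nat) (v : Int) :
    setAt (pre ++ a :: b :: post) (pre.length + 1) j v = pre ++ a :: b.set j v :: post := by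
  induction pre with
  | nil => simp [setAt, List.set, List.getD]
  | cons h t ih => simpa [setAt, List.set, List.getD] using ih

theorem doubleRow_succ (row : List Int) (k : Nat) (hk : k < row.length) :
    doubleRow (k+1) row = doubleRow k row ++ [row.getD k 0, row.getD k 0] := by
  have ht : row.take (k+1) = row.take k ++ [row[k]] := (List.take_append_getElem hk).symm
  rw [doubleRow, doubleRow, ht, List.flatMap_append]
  simp [List.getD, List.getElem?_eq_getElem hk]

theorem partialRow_succ (row : List Int) (w k : Nat) (hk : k < w) (hw : w ≤ row.length) :
    ((partialRow row w k).set (2*k) (row.getD k 0)).set (2*k+1) (row.getD k 0)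
      = partialRow row w (k+1) := by
  have hkl : k < row.length := lt_of_lt_of_le hk hw
  have hlen : (doubleRow k row).length = 2*k := doubleRow_length row k (le_of_lt hkl)
  have hrep : List.replicate (2*(w-k)) (0:Int)
      = 0 :: 0 :: List.replicate (2*(w-(k+1))) 0 := by
    have : 2*(w-k) = (2*(w-(k+1))) + 1 + 1 := by omega
    simp [this, List.replicate_succ]
  have h1 : (partialRow row w k).set (2*k) (row.getD k 0)
      = doubleRow k row ++ (row.getD k 0) :: 0 :: List.replicate (2*(w-(k+1))) 0 := by
    rw [partialRow, hrep, ← hlen, set_at_len]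
  have h2 : (doubleRow k row ++ (row.getD k 0) :: 0 :: List.replicate (2*(w-(k+1))) 0).set
        (2*k+1) (row.getD k 0)
      = doubleRow k row ++ (row.getD k 0) :: (row.getD k 0) :: List.replicate (2*(w-(k+1))) 0 := by
    have := set_at_len (doubleRow k row ++ [row.getD k 0]) (0:Int) (row.getD k 0)
      (List.replicate (2*(w-(k+1))) 0)
    simpa [hlen] using this
  rw [h1, h2, partialRow, doubleRow_succ row k hkl]
  simp

-- the inner loop turns the pair of zero rows at positions 2y, 2y+1 into the doubled row
theorem inner_inv (grid : List (List Int)) (y w k : Nat) (pre : List (List Int))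
    (post : List (List Int)) (hpre : pre.length = 2*y) (hk : k ≤ w)
    (hw : w ≤ (grid.getD y []).length) :
    (List.range k).foldl (innerStep grid y)
        (pre ++ partialRow (grid.getD y []) w 0 :: partialRow (grid.getD y []) w 0 :: post)
      = pre ++ partialRow (grid.getD y []) w k :: partialRow (grid.getD y []) w k :: post := by
  induction k with
  | zero => simp
  | succ n ih =>
    have hn : n ≤ w := by omega
    rw [List.range_succ, List.foldl_append, ih hn]
    have hy : 2*y = pre.length := hpre.symm
    simp only [List.foldl_cons, List.foldl_nil, innerStep]
    rw [hy]
    rw [setAt_pair0, setAt_pair0, setAt_pair1, setAt_pair1]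
    rw [partialRow_succ (grid.getD y []) w n (by omega) hw]

theorem partialRow_zero (row : List Int) (w : Nat) :
    partialRow row w 0 = List.replicate (2*w) 0 := by
  simp [partialRow, doubleRow]

theorem partialRow_full (row : List Int) (w : Nat) :
    partialRow row w w = doubleRow w row := by
  simp [partialRow]

-- the doubled-row block for a prefix of the grid
def dbl (w : Nat) (g : List (List Int)) : List (List Int) :=
  g.flatMap (fun row => [doubleRow w row, doubleRow w row])

theorem dbl_length (w : Nat) (g : List (List Int)) : (dbl w g).length = 2*g.length := by
  simp [dbl, List.length_flatMap, Function.comp]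
  omega

theorem outer_inv (grid : List (List Int)) (w k : Nat) (hk : k ≤ grid.length)
    (hw : ∀ row ∈ grid, w ≤ row.length) :
    (List.range k).foldl (fun res y => (List.range w).foldl (innerStep grid y) res)
        (List.replicate (2*grid.length) (List.replicate (2*w) 0))
      = dbl w (grid.take k)
          ++ List.replicate (2*(grid.length - k)) (List.replicate (2*w) 0) := by
  induction k with
  | zero => simp [dbl]
  | succ n ih =>
    have hn : n ≤ grid.length := by omega
    rw [List.range_succ, List.foldl_append, ih hn]
    simp only [List.foldl_cons, List.foldl_nil]
    have hnl : n < grid.length := by omega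
    have hrep : List.replicate (2*(grid.length - n)) (List.replicate (2*w) (0:Int))
        = List.replicate (2*w) 0 :: List.replicate (2*w) 0
            :: List.replicate (2*(grid.length - (n+1))) (List.replicate (2*w) 0) := by
      have : 2*(grid.length - n) = (2*(grid.length - (n+1))) + 1 + 1 := by omega
      simp [this, List.replicate_succ]
    rw [hrep]
    have hwn : w ≤ (grid.getD n []).length := by
      have hmem : grid.getD n [] ∈ grid := by
        have : grid.getD n [] = grid[n] := by
          simp [List.getD, List.getElem?_eq_getElem hnl]
        rw [this]; exact List.getElem_mem hnl
      exact hw _ hmem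
    have := inner_inv grid n w w (dbl w (grid.take n))
      (List.replicate (2*(grid.length - (n+1))) (List.replicate (2*w) 0))
      (by rw [dbl_length]; simp [List.length_take, Nat.min_eq_left hn])
      (le_refl w) hwn
    rw [partialRow_zero] at this
    rw [this, partialRow_full]
    have htake : grid.take (n+1) = grid.take n ++ [grid[n]] :=
      (List.take_append_getElem hnl).symm
    have hget : grid.getD n [] = grid[n] := by
      simp [List.getD, List.getElem?_eq_getElem hnl]
    have hdbl : dbl w (grid.take (n+1))
        = dbl w (grid.take n) ++ [doubleRow w grid[n], doubleRow w grid[n]] := by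
      rw [dbl, dbl, htake, List.flatMap_append]
      simp
    rw [hget, hdbl, List.append_assoc]
    rfl

-- bridge 1: the doubled row, written as B writes it (gather by j/2)
theorem doubleRow_eq_gather (row : List Int) (w : Nat) (hw : w ≤ row.length) :
    doubleRow w row = (List.range (2*w)).map (fun j => row.getD (j/2) 0) := by
  induction w with
  | zero => simp [doubleRow]
  | succ n ih =>
    have hn : n ≤ row.length := by omega
    have h2 : 2*(n+1) = 2*n + 1 + 1 := by omega
    rw [doubleRow_succ row n (by omega), ih hn, h2, List.range_succ, List.range_succ]
    have ha : (2*n)/2 = n := by omega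
    have hb : (2*n+1)/2 = n := by omega
    simp [ha, hb]

-- bridge 2: the i-th row of dbl is the (i/2)-th doubled row
theorem dbl_getD (w : Nat) (g : List (List Int)) (i : Nat) (hi : i < 2*g.length) :
    (dbl w g).getD i [] = doubleRow w (g.getD (i/2) []) := by
  induction g generalizing i with
  | nil => simp at hi
  | cons r t ih =>
    match i with
    | 0 => simp [dbl, List.getD]
    | 1 => simp [dbl, List.getD]
    | Nat.succ (Nat.succ k) =>
      have hk : k < 2*t.length := by simp at hi; omega
      have hdiv : (k+1+1)/2 = k/2 + 1 := by omega
      have : (dbl w (r :: t)).getD (k+1+1) [] = (dbl w t).getD k [] := by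
        simp [dbl, List.getD]
      rw [this, ih k hk, hdiv]
      simp [List.getD]

theorem dbl_eq_gather (grid : List (List Int)) (hw : ∀ row ∈ grid, (grid.headD []).length ≤ row.length) :
    dbl (grid.headD []).length grid
      = (List.range (2*grid.length)).map (fun i =>
          (List.range (2*(grid.headD []).length)).map (fun j =>
            (grid.getD (i/2) []).getD (j/2) 0)) := by
  apply List.ext_getElem
  · simp [dbl_length]
  · intro i h1 h2
    have hi : i < 2*grid.length := by simpa [dbl_length] using h1
    have hgd : (dbl (grid.headD []).length grid)[i] = (dbl (grid.headD []).length grid).getD i [] :=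
      (List.getD_eq_getElem _ _ h1).symm
    have hi2 : i/2 < grid.length := by omega
    have hmem : grid.getD (i/2) [] ∈ grid := by
      have : grid.getD (i/2) [] = grid[i/2] := by
        simp [List.getD, List.getElem?_eq_getElem hi2]
      rw [this]; exact List.getElem_mem hi2
    rw [hgd, dbl_getD _ _ _ hi,
      doubleRow_eq_gather _ _ (hw _ hmem)]
    simp

-- ===== VERDICT (by name: the statement is the Claim_ definition above) =====
theorem scale_2x_spec : Claim_equal_scale_2x := by
  intro grid _ hpre
  unfold Spec_scale_2x scale_2x scale_2x_alt
  split_ifs with hg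
  · rfl
  · have hinit : (List.range (2*grid.length)).map
        (fun _ => List.replicate (2*(grid.headD []).length) (0:Int))
        = List.replicate (2*grid.length) (List.replicate (2*(grid.headD []).length) 0) := by
      simp
    rw [hinit,
      outer_inv grid (grid.headD []).length grid.length (le_refl _) (fun row h => hpre row h)]
    simp only [List.take_length, Nat.sub_self, Nat.mul_zero, List.replicate_zero,
      List.append_nil]
    exact dbl_eq_gather grid hpre
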